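-- pv_equiv track=rewrite | github.com/opendemo-work/opendemo-cli | opendemo/core/demo_manager.py | _generate_demo_name
-- ===== SOURCE A (Python) =====
-- def _generate_demo_name(name: str, language: str) -> str:
--     """
--     生成demo目录名
--
--     Args:
--         name: demo名称
--         language: 编程语言
--
--     Returns:
--         目录名（纯ASCII英文）
--     """
--     # 将名称转换为合法的目录名
--     safe_name = name.lower().replace(' ', '-').replace('_', '-')
--     # 只保留ASCII字母、数字和连字符（移除中文等非ASCII字符）
--     safe_name = ''.join(c for c in safe_name if c.isascii() and (c.isalnum() or c == '-'))
--     # 移除连续的连字符和首尾连字符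
--     while '--' in safe_name:
--         safe_name = safe_name.replace('--', '-')
--     safe_name = safe_name.strip('-')
--     # 确保名称不为空
--     if not safe_name:
--         safe_name = 'demo'
--     return f"{language.lower()}-{safe_name}"
-- ===== SOURCE B (Python) =====
-- def _generate_demo_name(name: str, language: str) -> str:
--     # Single left-to-right pass: dash-class chars (' ', '_', '-') emit one dash
--     # unless output is empty or already ends with a dash; ASCII alphanumerics are
--     # kept; everything else is dropped. One trailing dash is removed at the end.
--     out = []
--     last_dash = False
--     for c in name.lower():
--         if c in ' _-':
--             if out and not last_dash:
--                 out.append('-')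
--                 last_dash = True
--         elif c.isascii() and c.isalnum():
--             out.append(c)
--             last_dash = False
--     if last_dash:
--         out.pop()
--     safe = ''.join(out) or 'demo'
--     return f"{language.lower()}-{safe}"
-- ===== Notes on version B (the rewrite author's own statement) =====
-- stated objective: alternative
-- what changed: Replaced A's multi-pass pipeline (two replace passes, a filter pass, a repeated replace('--','-') while-loop and a strip) by one stateful left-to-right scan that emits at most one dash between kept alphanumeric runs and drops one trailing dash.
import Mathlib
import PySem

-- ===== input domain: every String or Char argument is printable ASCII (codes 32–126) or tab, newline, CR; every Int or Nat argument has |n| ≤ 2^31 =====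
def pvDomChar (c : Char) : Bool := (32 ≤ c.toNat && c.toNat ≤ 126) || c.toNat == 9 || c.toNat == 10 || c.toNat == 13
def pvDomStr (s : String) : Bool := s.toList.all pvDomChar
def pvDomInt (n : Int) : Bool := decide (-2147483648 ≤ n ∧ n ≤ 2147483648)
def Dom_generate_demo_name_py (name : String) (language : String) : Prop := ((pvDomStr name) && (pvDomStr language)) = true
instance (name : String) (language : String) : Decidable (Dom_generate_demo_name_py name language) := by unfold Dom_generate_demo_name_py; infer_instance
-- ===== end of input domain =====

-- B replaces A's multi-pass pipeline (two replaces, a filter, a while-replace('--','-') loop, a strip) by one stateful left-to-right scan.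

-- ===== PORT A =====
-- helper: what one pass of s.replace('--','-') computes (needed only to prove A's while-loop terminates)
def repDD : List Char → List Char
  | [] => []
  | [c] => [c]
  | c :: d :: t => if c = '-' ∧ d = '-' then '-' :: repDD t else c :: repDD (d :: t)

theorem repDD_eq_cons (c d : Char) (t : List Char) :
    repDD (c :: d :: t) = if c = '-' ∧ d = '-' then '-' :: repDD t else c :: repDD (d :: t) := rfl

theorem go_dd (fuel : Nat) : ∀ l acc : List Char, l.length ≤ fuel →
    PySem.Chars.replace.go ['-', '-'] ['-'] fuel l acc = acc.reverse ++ repDD l := by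
  induction fuel with
  | zero =>
    intro l acc h
    have hl : l = [] := List.eq_nil_of_length_eq_zero (Nat.le_zero.mp h)
    subst hl
    rw [PySem.Chars.replace.go.eq_def]
    simp [repDD]
  | succ n ih =>
    intro l acc h
    rw [PySem.Chars.replace.go.eq_def]
    match l with
    | [] => simp [repDD]
    | [c] =>
      have hpre : List.isPrefixOf ['-', '-'] [c] = false := by
        apply Bool.eq_false_iff.mpr
        intro hp
        simp [List.isPrefixOf] at hp
      simp only [hpre, Bool.false_eq_true, if_false]
      rw [ih [] (c :: acc) (by simp)]
      simp [repDD]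
    | c :: d :: t =>
      simp only [List.length_cons] at h
      by_cases hcd : c = '-' ∧ d = '-'
      · obtain ⟨hc, hd⟩ := hcd
        subst hc; subst hd
        have hpre : List.isPrefixOf ['-', '-'] ('-' :: '-' :: t) = true := by
          simp [List.isPrefixOf]
        simp only [hpre, if_true]
        rw [show List.drop (['-', '-'] : List Char).length ('-' :: '-' :: t) = t from rfl,
            show (['-'] : List Char).reverse ++ acc = '-' :: acc from rfl]
        rw [ih t ('-' :: acc) (by omega)]
        rw [repDD_eq_cons, if_pos ⟨rfl, rfl⟩]
        simp
      · have hpre : List.isPrefixOf ['-', '-'] (c :: d :: t) = false := by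
          apply Bool.eq_false_iff.mpr
          intro hp
          simp [List.isPrefixOf] at hp
          exact hcd ⟨hp.1.symm, hp.2.symm⟩
        simp only [hpre, Bool.false_eq_true, if_false]
        rw [ih (d :: t) (c :: acc) (by simp only [List.length_cons]; omega)]
        rw [repDD_eq_cons, if_neg hcd]
        simp

theorem replace_dd_eq (l : List Char) : PySem.Chars.replace l ['-', '-'] ['-'] = repDD l := by
  rw [PySem.Chars.replace]
  simp only [List.isEmpty_cons, Bool.false_eq_true, if_false]
  rw [go_dd l.length l [] le_rfl]
  simp

theorem repDD_len_le (l : List Char) : (repDD l).length ≤ l.length := by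
  induction l using repDD.induct with
  | case1 => simp [repDD]
  | case2 c => simp [repDD]
  | case3 c d t hcd ih =>
    rw [repDD_eq_cons, if_pos hcd]
    simp only [List.length_cons]
    omega
  | case4 c d t hcd ih =>
    rw [repDD_eq_cons, if_neg hcd]
    simp only [List.length_cons] at ih ⊢
    omega

theorem repDD_len_lt (l : List Char) (h : ['-', '-'] <:+: l) : (repDD l).length < l.length := by
  induction l using repDD.induct with
  | case1 => exact absurd h.length_le (by simp)
  | case2 c => exact absurd h.length_le (by simp)
  | case3 c d t hcd ih =>
    rw [repDD_eq_cons, if_pos hcd]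
    have := repDD_len_le t
    simp only [List.length_cons]
    omega
  | case4 c d t hcd ih =>
    rw [repDD_eq_cons, if_neg hcd]
    have hinf : ['-', '-'] <:+: (d :: t) := by
      obtain ⟨pre, suf, hps⟩ := h
      match pre, hps with
      | [], hps =>
        simp only [List.nil_append, List.cons_append, List.cons.injEq] at hps
        exact absurd ⟨hps.1.symm, hps.2.1.symm⟩ hcd
      | p :: ps, hps =>
        simp only [List.cons_append, List.cons.injEq] at hps
        exact ⟨ps, suf, hps.2⟩
    have := ih hinf
    simp only [List.length_cons] at this ⊢
    omega

theorem replace_dd_lt (s : String) (h : PySem.Str.isIn "--" s = true) :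
    (PySem.Str.replace s "--" "-").toList.length < s.toList.length := by
  have hdd : ("--" : String).toList = ['-', '-'] := by decide
  have hd1 : ("-" : String).toList = ['-'] := by decide
  have hinf : ['-', '-'] <:+: s.toList := by
    rw [← hdd]; exact (PySem.Str.isIn_iff_infix _ _).mp h
  have hrep : (PySem.Str.replace s "--" "-").toList = repDD s.toList := by
    simp [hdd, hd1, replace_dd_eq]
  rw [hrep]
  exact repDD_len_lt _ hinf

-- the `while '--' in safe_name: safe_name = safe_name.replace('--','-')` loop of A
def collapseLoop (s : String) : String :=
  if h : PySem.Str.isIn "--" s = true then collapseLoop (PySem.Str.replace s "--" "-") else s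
termination_by s.toList.length
decreasing_by exact replace_dd_lt s h

def generate_demo_name_py (name : String) (language : String) : String :=
  -- safe_name = name.lower().replace(' ', '-').replace('_', '-')
  let safe1 := PySem.Str.replace (PySem.Str.replace (PySem.Str.lower name) " " "-") "_" "-"
  -- ''.join(c for c in safe_name if c.isascii() and (c.isalnum() or c == '-'))
  -- (c.isascii() ported by hand as c.toNat ≤ 127: exact)
  let safe2 := String.ofList (safe1.toList.filter
    (fun c => decide (c.toNat ≤ 127) && (PySem.Chars.isalnum c || c == '-')))
  -- while '--' in safe_name: safe_name = safe_name.replace('--', '-')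
  let safe3 := collapseLoop safe2
  -- safe_name = safe_name.strip('-')
  let safe4 := PySem.Str.stripChars safe3 "-"
  -- if not safe_name: safe_name = 'demo'
  let safe5 := if safe4.toList.isEmpty then "demo" else safe4
  -- f"{language.lower()}-{safe_name}"
  String.ofList ((PySem.Str.lower language).toList ++ '-' :: safe5.toList)

-- ===== PORT B =====
def altStep (st : List Char × Bool) (c : Char) : List Char × Bool :=
  if c = ' ' ∨ c = '_' ∨ c = '-' then
    if st.1 ≠ [] ∧ st.2 = false then (st.1 ++ ['-'], true) else st
  else if c.toNat ≤ 127 ∧ PySem.Chars.isalnum c = true then (st.1 ++ [c], false)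
  else st

def generate_demo_name_py_alt (name : String) (language : String) : String :=
  let st := (PySem.Chars.lower name.toList).foldl altStep ([], false)
  let out := if st.2 then st.1.dropLast else st.1
  let safe := if out.isEmpty then "demo".toList else out
  String.ofList (PySem.Chars.lower language.toList ++ '-' :: safe)

-- ===== PRECONDITION & SPEC =====
def Spec_generate_demo_name_py (name : String) (language : String) (out : String) : Prop := out = generate_demo_name_py_alt name language
instance (name : String) (language : String) (out : String) : Decidable (Spec_generate_demo_name_py name language out) := by unfold Spec_generate_demo_name_py; infer_instance

-- ===== CLAIM (what is proved, stated in full; the proofs are below) =====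
def Claim_equal_generate_demo_name_py : Prop := ∀ (name : String) (language : String), Dom_generate_demo_name_py name language → Spec_generate_demo_name_py name language (generate_demo_name_py name language)

-- ===== LEMMAS AND PROOFS =====

-- dash-run collapse ("keep the first dash of each run")
def dedupF : List Char → List Char
  | [] => []
  | c :: t =>
    if c = '-' then '-' :: dedupF (t.dropWhile (· == '-')) else c :: dedupF t
termination_by l => l.length
decreasing_by
  · have := List.length_dropWhile_le (fun c => c == '-') t; simp at *; omega
  · simp

theorem dedupF_nil : dedupF [] = [] := by simp [dedupF]

theorem dedupF_cons_dash (t : List Char) :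
    dedupF ('-' :: t) = '-' :: dedupF (t.dropWhile (· == '-')) := by
  rw [dedupF]; simp

theorem dedupF_cons_ne (c : Char) (t : List Char) (hc : c ≠ '-') :
    dedupF (c :: t) = c :: dedupF t := by
  rw [dedupF]; simp [hc]

theorem dropWhile_dash_cons (t : List Char) :
    List.dropWhile (fun x => x == '-') ('-' :: t) = List.dropWhile (fun x => x == '-') t := by
  rw [List.dropWhile_cons]
  simp

theorem head?_repDD (l : List Char) : (repDD l).head? = l.head? := by
  induction l using repDD.induct with
  | case1 => rfl
  | case2 c => rfl
  | case3 c d t hcd ih =>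
    rw [repDD_eq_cons, if_pos hcd]
    simp [hcd.1]
  | case4 c d t hcd ih =>
    rw [repDD_eq_cons, if_neg hcd]
    rfl

theorem head?_dedupF (l : List Char) : (dedupF l).head? = l.head? := by
  match l with
  | [] => rw [dedupF_nil]
  | c :: t =>
    by_cases hc : c = '-'
    · subst hc; rw [dedupF_cons_dash]; rfl
    · rw [dedupF_cons_ne c t hc]; rfl

theorem dropWhile_head_false {p : Char → Bool} {l : List Char} {b : Char}
    (h : (l.dropWhile p).head? = some b) : p b = false := by
  induction l with
  | nil => simp at h
  | cons c t ih =>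
    rw [List.dropWhile_cons] at h
    by_cases hp : p c = true
    · simp [hp] at h; exact ih h
    · simp [hp] at h; rw [← h]; simpa using hp

-- dedupF is invariant under one replace('--','-') pass
theorem dedupF_repDD (n : Nat) : ∀ l : List Char, l.length ≤ n →
    dedupF (repDD l) = dedupF l ∧
    dedupF ((repDD l).dropWhile (· == '-')) = dedupF (l.dropWhile (· == '-')) := by
  induction n with
  | zero =>
    intro l h
    have hl : l = [] := List.eq_nil_of_length_eq_zero (Nat.le_zero.mp h)
    subst hl
    simp [repDD]
  | succ n ih =>
    intro l h
    match l with
    | [] => simp [repDD]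
    | [c] => simp [repDD]
    | c :: d :: t =>
      simp only [List.length_cons] at h
      by_cases hcd : c = '-' ∧ d = '-'
      · obtain ⟨hc, hd⟩ := hcd
        subst hc; subst hd
        rw [repDD_eq_cons, if_pos ⟨rfl, rfl⟩]
        have iht := ih t (by omega)
        constructor
        · rw [dedupF_cons_dash, dedupF_cons_dash, dropWhile_dash_cons]
          rw [iht.2]
        · rw [dropWhile_dash_cons, dropWhile_dash_cons, dropWhile_dash_cons]
          exact iht.2
      · by_cases hc : c = '-'
        · subst hc
          have hd : d ≠ '-' := fun hd => hcd ⟨rfl, hd⟩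
          rw [repDD_eq_cons, if_neg hcd]
          have ihdt := ih (d :: t) (by simp only [List.length_cons]; omega)
          have hhead : (repDD (d :: t)).head? = some d := by rw [head?_repDD]; rfl
          have hdw : (repDD (d :: t)).dropWhile (· == '-') = repDD (d :: t) := by
            cases hrep : repDD (d :: t) with
            | nil => rfl
            | cons x xs =>
              have hx : x = d := by rw [hrep] at hhead; simpa using hhead
              subst hx
              exact List.dropWhile_cons_of_neg (by simp [hd])
          have hdw2 : (d :: t).dropWhile (· == '-') = d :: t :=
            List.dropWhile_cons_of_neg (by simp [hd])
          constructor
          · rw [dedupF_cons_dash, dedupF_cons_dash, hdw, hdw2, ihdt.1]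
          · rw [dropWhile_dash_cons, dropWhile_dash_cons, hdw, hdw2, ihdt.1]
        · rw [repDD_eq_cons, if_neg hcd]
          have ihdt := ih (d :: t) (by simp only [List.length_cons]; omega)
          have h1 : dedupF (c :: repDD (d :: t)) = c :: dedupF (d :: t) := by
            rw [dedupF_cons_ne c _ hc, ihdt.1]
          constructor
          · rw [h1, dedupF_cons_ne c _ hc]
          · rw [List.dropWhile_cons_of_neg (by simp [hc]),
                List.dropWhile_cons_of_neg (by simp [hc]), h1,
                dedupF_cons_ne c _ hc]

-- a string without '--' is a fixpoint of dedupF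
theorem dedupF_no_dd (n : Nat) : ∀ l : List Char, l.length ≤ n →
    ¬ (['-', '-'] <:+: l) → dedupF l = l := by
  induction n with
  | zero =>
    intro l h _
    have hl : l = [] := List.eq_nil_of_length_eq_zero (Nat.le_zero.mp h)
    subst hl
    exact dedupF_nil
  | succ n ih =>
    intro l h hno
    match l with
    | [] => exact dedupF_nil
    | c :: t =>
      simp only [List.length_cons] at h
      have hnt : ¬ (['-', '-'] <:+: t) := fun hi => hno (List.infix_cons hi)
      by_cases hc : c = '-'
      · subst hc
        have ht : t.dropWhile (· == '-') = t := by
          cases t with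
          | nil => rfl
          | cons d u =>
            have hd : d ≠ '-' := by
              intro hd; subst hd
              exact hno ⟨[], u, rfl⟩
            exact List.dropWhile_cons_of_neg (by simp [hd])
        rw [dedupF_cons_dash, ht, ih t (by omega) hnt]
      · rw [dedupF_cons_ne c t hc, ih t (by omega) hnt]

theorem collapseLoop_toList (n : Nat) : ∀ s : String, s.toList.length ≤ n →
    (collapseLoop s).toList = dedupF s.toList := by
  induction n with
  | zero =>
    intro s h
    rw [collapseLoop]
    have hl : s.toList = [] := List.eq_nil_of_length_eq_zero (Nat.le_zero.mp h)
    have hin : ¬ PySem.Str.isIn "--" s = true := by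
      intro hc
      have hi := (PySem.Str.isIn_iff_infix _ _).mp hc
      rw [hl] at hi
      exact absurd hi.length_le (by simp)
    rw [dif_neg hin, hl, dedupF_nil]
  | succ n ih =>
    intro s h
    rw [collapseLoop]
    by_cases hin : PySem.Str.isIn "--" s = true
    · rw [dif_pos hin]
      have hlt := replace_dd_lt s hin
      rw [ih _ (by omega)]
      have hdd : ("--" : String).toList = ['-', '-'] := by decide
      have hd1 : ("-" : String).toList = ['-'] := by decide
      have hrep : (PySem.Str.replace s "--" "-").toList = repDD s.toList := by
        simp [hdd, hd1, replace_dd_eq]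
      rw [hrep, (dedupF_repDD s.toList.length s.toList le_rfl).1]
    · rw [dif_neg hin]
      have hno : ¬ (['-', '-'] <:+: s.toList) := by
        intro hi
        have hdd : ("--" : String).toList = ['-', '-'] := by decide
        exact hin ((PySem.Str.isIn_iff_infix _ _).mpr (hdd ▸ hi))
      exact (dedupF_no_dd s.toList.length s.toList le_rfl hno).symm

-- single-character replace is a map
theorem go_single (a b : Char) (fuel : Nat) : ∀ l acc : List Char, l.length ≤ fuel →
    PySem.Chars.replace.go [a] [b] fuel l acc =
      acc.reverse ++ l.map (fun c => if c = a then b else c) := by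
  induction fuel with
  | zero =>
    intro l acc h
    have hl : l = [] := List.eq_nil_of_length_eq_zero (Nat.le_zero.mp h)
    subst hl
    rw [PySem.Chars.replace.go.eq_def]
    simp
  | succ n ih =>
    intro l acc h
    rw [PySem.Chars.replace.go.eq_def]
    match l with
    | [] => simp
    | c :: t =>
      simp only [List.length_cons] at h
      by_cases hc : c = a
      · subst hc
        have hpre : List.isPrefixOf [c] (c :: t) = true := by simp [List.isPrefixOf]
        simp only [hpre, if_true]
        rw [show List.drop ([c] : List Char).length (c :: t) = t from rfl,
            show ([b] : List Char).reverse ++ acc = b :: acc from rfl]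
        rw [ih t (b :: acc) (by omega)]
        simp
      · have hpre : List.isPrefixOf [a] (c :: t) = false := by
          apply Bool.eq_false_iff.mpr
          intro hp
          simp [List.isPrefixOf] at hp
          exact hc hp.symm
        simp only [hpre, Bool.false_eq_true, if_false]
        rw [ih t (c :: acc) (by omega)]
        simp [hc]

theorem replace_single (l : List Char) (a b : Char) :
    PySem.Chars.replace l [a] [b] = l.map (fun c => if c = a then b else c) := by
  rw [PySem.Chars.replace]
  simp only [List.isEmpty_cons, Bool.false_eq_true, if_false]
  rw [go_single a b l.length l [] le_rfl]
  simp

def dashify (c : Char) : Char := if c = ' ' then '-' else if c = '_' then '-' else c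

def keepP (c : Char) : Bool := decide (c.toNat ≤ 127) && (PySem.Chars.isalnum c || c == '-')

def stepG (st : List Char × Bool) (c : Char) : List Char × Bool :=
  if c = '-' then
    if st.1 ≠ [] ∧ st.2 = false then (st.1 ++ ['-'], true) else st
  else (st.1 ++ [c], false)

-- B's scan over the raw lowered characters is the scan over A's dashified+filtered characters
theorem fold_red : ∀ (l : List Char) (st : List Char × Bool),
    List.foldl altStep st l = List.foldl stepG st ((l.map dashify).filter keepP) := by
  intro l
  induction l with
  | nil => intro st; rfl
  | cons c t ih =>
    intro st
    by_cases hdcl : c = ' ' ∨ c = '_' ∨ c = '-'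
    · have hdash : dashify c = '-' := by
        rcases hdcl with h | h | h <;> subst h <;> simp [dashify]
    
      have hkeep : keepP '-' = true := by decide
      simp only [List.map_cons, hdash, List.filter_cons, hkeep, if_true, List.foldl_cons]
      rw [ih]
      congr 1
      rw [show altStep st c = if st.1 ≠ [] ∧ st.2 = false then (st.1 ++ ['-'], true) else st
            from by rw [altStep, if_pos hdcl]]
      rw [show stepG st '-' = if st.1 ≠ [] ∧ st.2 = false then (st.1 ++ ['-'], true) else st
            from by rw [stepG, if_pos rfl]]
    · have hdash : dashify c = c := by
        rw [dashify, if_neg (fun h => hdcl (Or.inl h)), if_neg (fun h => hdcl (Or.inr (Or.inl h)))]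
      have hcd : c ≠ '-' := fun h => hdcl (Or.inr (Or.inr h))
      by_cases hk : c.toNat ≤ 127 ∧ PySem.Chars.isalnum c = true
      · have hkeep : keepP c = true := by
          simp [keepP, hk.1, hk.2]
        simp only [List.map_cons, hdash, List.filter_cons, hkeep, if_true, List.foldl_cons]
        rw [ih]
        congr 1
        rw [show altStep st c = (st.1 ++ [c], false)
              from by rw [altStep, if_neg hdcl, if_pos hk]]
        rw [show stepG st c = (st.1 ++ [c], false) from by rw [stepG, if_neg hcd]]
      · have hkeep : keepP c = false := by
          simp only [keepP, Bool.and_eq_false_iff]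
          by_cases h127 : c.toNat ≤ 127
          · right
            simp only [Bool.or_eq_false_iff]
            refine ⟨?_, by simpa using hcd⟩
            rw [← Bool.not_eq_true]
            intro hal
            exact hk ⟨h127, hal⟩
          · left; simpa using h127
        simp only [List.map_cons, hdash, List.filter_cons, hkeep, Bool.false_eq_true,
          if_false, List.foldl_cons]
        rw [← ih]
        congr 1
        rw [altStep, if_neg hdcl, if_neg hk]

-- the emitted-suffix function of the scan
def emitE : Bool → List Char → List Char × Bool
  | d, [] => ([], d)
  | d, c :: t =>
    if c = '-' then
      if d then emitE d t else (('-' :: (emitE true t).1), (emitE true t).2)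
    else ((c :: (emitE false t).1), (emitE false t).2)

theorem emitE_nil (d : Bool) : emitE d [] = ([], d) := rfl

theorem emitE_cons (d : Bool) (c : Char) (t : List Char) :
    emitE d (c :: t) =
      if c = '-' then
        if d then emitE d t else (('-' :: (emitE true t).1), (emitE true t).2)
      else ((c :: (emitE false t).1), (emitE false t).2) := rfl

theorem foldl_stepG_emitE : ∀ (g : List Char) (st : List Char × Bool), st.1 ≠ [] →
    List.foldl stepG st g = (st.1 ++ (emitE st.2 g).1, (emitE st.2 g).2) := by
  intro g
  induction g with
  | nil => intro st h; rw [List.foldl_nil, emitE_nil]; simp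
  | cons c t ih =>
    intro st h
    rw [List.foldl_cons]
    by_cases hc : c = '-'
    · subst hc
      cases hd : st.2 with
      | false =>
        have hstep : stepG st '-' = (st.1 ++ ['-'], true) := by
          rw [stepG, if_pos rfl, if_pos ⟨h, hd⟩]
        have hE : emitE false ('-' :: t) = ('-' :: (emitE true t).1, (emitE true t).2) := by
          rw [emitE_cons, if_pos rfl]
          simp
        rw [hstep, ih (st.1 ++ ['-'], true) (by simp), hE]
        simp
      | true =>
        have hstep : stepG st '-' = st := by
          rw [stepG, if_pos rfl, if_neg (by rw [hd]; simp)]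
        have hE : emitE true ('-' :: t) = emitE true t := by
          rw [emitE_cons, if_pos rfl]
          simp
        rw [hstep, ih st h, hd, hE]
    · have hstep : stepG st c = (st.1 ++ [c], false) := by rw [stepG, if_neg hc]
      have hE : emitE st.2 (c :: t) = (c :: (emitE false t).1, (emitE false t).2) := by
        rw [emitE_cons, if_neg hc]
      rw [hstep, ih (st.1 ++ [c], false) (by simp), hE]
      simp

theorem emitE_spec : ∀ t : List Char,
    (emitE false t).1 = dedupF t ∧
    ((emitE false t).2 = ((dedupF t).getLast? == some '-')) ∧
    (emitE true t).1 = dedupF (t.dropWhile (· == '-')) ∧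
    ((emitE true t).2 = (((dedupF (t.dropWhile (· == '-'))).getLast?.getD '-') == '-')) := by
  intro t
  induction t with
  | nil =>
    rw [emitE_nil, emitE_nil]
    simp [dedupF_nil]
  | cons c t ih =>
    obtain ⟨ih1, ih2, ih3, ih4⟩ := ih
    by_cases hc : c = '-'
    · subst hc
      have hdw : ('-' :: t).dropWhile (· == '-') = t.dropWhile (· == '-') :=
        List.dropWhile_cons_of_pos (by simp)
      refine ⟨?_, ?_, ?_, ?_⟩
      · rw [emitE_cons, if_pos rfl]
        simp only [Bool.false_eq_true, if_false]
        rw [dedupF_cons_dash, ih3]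
      · rw [emitE_cons, if_pos rfl]
        simp only [Bool.false_eq_true, if_false]
        rw [ih4, dedupF_cons_dash, List.getLast?_cons]
        simp
      · rw [emitE_cons, if_pos rfl, if_pos rfl, hdw, ih3]
      · rw [emitE_cons, if_pos rfl, if_pos rfl, hdw, ih4]
    · have hdw : (c :: t).dropWhile (· == '-') = c :: t :=
        List.dropWhile_cons_of_neg (by simp [hc])
      have hded : dedupF (c :: t) = c :: dedupF t := dedupF_cons_ne c t hc
      have hlast : ((c :: dedupF t).getLast? == some '-') =
          ((dedupF t).getLast? == some '-') := by
        rw [List.getLast?_cons]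
        cases hX : (dedupF t).getLast? with
        | none => simp [hc]
        | some x => simp
      refine ⟨?_, ?_, ?_, ?_⟩
      · rw [emitE_cons, if_neg hc, hded, ih1]
      · rw [emitE_cons, if_neg hc, ih2, hded, hlast]
      · rw [emitE_cons, if_neg hc, hdw, hded, ih1]
      · rw [emitE_cons, if_neg hc, hdw, hded, ih2, List.getLast?_cons]
        cases hX : (dedupF t).getLast? with
        | none => simp [hc]
        | some x => simp
    
-- leading dashes do not change the scan state
theorem foldl_stepG_dropWhile : ∀ g : List Char,
    List.foldl stepG ([], false) g = List.foldl stepG ([], false) (g.dropWhile (· == '-')) := by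
  intro g
  induction g with
  | nil => rfl
  | cons c t ih =>
    by_cases hc : c = '-'
    · subst hc
      rw [dropWhile_dash_cons]
      rw [List.foldl_cons]
      have hstep : stepG ([], false) '-' = ([], false) := by
        rw [stepG, if_pos rfl, if_neg (by simp)]
      rw [hstep, ih]
    · rw [List.dropWhile_cons_of_neg (by simp [hc])]

-- dedupF commutes with stripping leading dashes
theorem dropWhile_dedupF (n : Nat) : ∀ g : List Char, g.length ≤ n →
    (dedupF g).dropWhile (· == '-') = dedupF (g.dropWhile (· == '-')) := by
  induction n with
  | zero =>
    intro g h
    have hg : g = [] := List.eq_nil_of_length_eq_zero (Nat.le_zero.mp h)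
    subst hg
    simp [dedupF_nil]
  | succ n ih =>
    intro g h
    match g with
    | [] => simp [dedupF_nil]
    | c :: t =>
      simp only [List.length_cons] at h
      by_cases hc : c = '-'
      · subst hc
        rw [dedupF_cons_dash]
        rw [dropWhile_dash_cons, dropWhile_dash_cons]
        have hlen : (t.dropWhile (· == '-')).length ≤ n := by
          have := List.length_dropWhile_le (fun c => c == '-') t
          omega
        rw [ih _ hlen, List.dropWhile_idempotent]
      · rw [dedupF_cons_ne c t hc,
            List.dropWhile_cons_of_neg (by simp [hc]),
            List.dropWhile_cons_of_neg (by simp [hc]),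
            dedupF_cons_ne c t hc]

-- dedupF never produces two consecutive dashes
theorem dedupF_no_dd_out (n : Nat) : ∀ g : List Char, g.length ≤ n →
    ¬ (['-', '-'] <:+: dedupF g) := by
  induction n with
  | zero =>
    intro g h
    have hg : g = [] := List.eq_nil_of_length_eq_zero (Nat.le_zero.mp h)
    subst hg
    rw [dedupF_nil]
    intro hi
    exact absurd hi.length_le (by simp)
  | succ n ih =>
    intro g h
    match g with
    | [] =>
      rw [dedupF_nil]
      intro hi
      exact absurd hi.length_le (by simp)
    | c :: t =>
      simp only [List.length_cons] at h
      by_cases hc : c = '-'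
      · subst hc
        rw [dedupF_cons_dash]
        intro hi
        obtain ⟨pre, suf, hps⟩ := hi
        match pre, hps with
        | [], hps =>
          simp only [List.nil_append, List.cons_append, List.cons.injEq] at hps
          have hh : (dedupF (t.dropWhile (· == '-'))).head? = some '-' := by
            rw [← hps.2]
            simp
          rw [head?_dedupF] at hh
          have := dropWhile_head_false hh
          simp at this
        | p :: ps, hps =>
          simp only [List.cons_append, List.cons.injEq] at hps
          have hlen : (t.dropWhile (· == '-')).length ≤ n := by
            have := List.length_dropWhile_le (fun c => c == '-') t
            omega
          exact ih _ hlen ⟨ps, suf, hps.2⟩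
      · rw [dedupF_cons_ne c t hc]
        intro hi
        obtain ⟨pre, suf, hps⟩ := hi
        match pre, hps with
        | [], hps =>
          simp only [List.nil_append, List.cons_append, List.cons.injEq] at hps
          exact hc hps.1.symm
        | p :: ps, hps =>
          simp only [List.cons_append, List.cons.injEq] at hps
          exact ih t (by omega) ⟨ps, suf, hps.2⟩

-- right strip of a collapsed string removes exactly one trailing dash
theorem rstrip_no_dd (X : List Char) (c : Char)
    (hnd : ¬ (['-', '-'] <:+: X)) (hc : c ≠ '-') :
    (List.dropWhile (· == '-') ((c :: X).reverse)).reverse =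
      if X.getLast? == some '-' then c :: X.dropLast else c :: X := by
  rcases List.eq_nil_or_concat X with hX | ⟨Y, x, hX⟩
  · subst hX
    simp only [List.reverse_cons, List.reverse_nil, List.nil_append]
    rw [List.dropWhile_cons_of_neg (by simp [hc])]
    simp
  · subst hX
    simp only [List.concat_eq_append] at hnd ⊢
    have hrev : (c :: (Y ++ [x])).reverse = x :: (Y.reverse ++ [c]) := by simp
    rw [hrev]
    by_cases hx : x = '-'
    · subst hx
      have hYlast : ∀ y, Y.getLast? = some y → y ≠ '-' := by
        intro y hy hy'
        subst hy'
        obtain ⟨Y', hY'⟩ := List.getLast?_eq_some_iff.mp hy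
        apply hnd
        refine ⟨Y', [], ?_⟩
        rw [hY']
        simp
      rw [List.dropWhile_cons_of_pos (by simp)]
      have hdw : List.dropWhile (· == '-') (Y.reverse ++ [c]) = Y.reverse ++ [c] := by
        cases hY : Y.reverse with
        | nil =>
          simp only [List.nil_append]
          exact List.dropWhile_cons_of_neg (by simp [hc])
        | cons y ys =>
          have hy : Y.getLast? = some y := by
            rw [← List.head?_reverse]; rw [hY]; rfl
          have := hYlast y hy
          simp only [List.cons_append]
          exact List.dropWhile_cons_of_neg (by simp [this])
      rw [hdw]
      rw [if_pos (by simp)]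
      rw [List.dropLast_concat]
      simp
    · rw [List.dropWhile_cons_of_neg (by simp [hx])]
      rw [if_neg (by rw [List.getLast?_concat]; simp [hx])]
      rw [← hrev, List.reverse_reverse]

-- strip('-') written with the list primitives
theorem stripChars_dash (L : List Char) :
    PySem.Chars.stripChars L ['-'] =
      (List.dropWhile (· == '-') (List.dropWhile (· == '-') L).reverse).reverse := by
  have hpred : (fun c => (['-'] : List Char).contains c) = (fun c : Char => c == '-') := by
    funext x
    by_cases h : x = '-' <;> simp [h]
  rw [PySem.Chars.stripChars]
  rw [hpred]

-- the heart: A's collapse+strip equals B's scan result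
theorem core_lemma (g : List Char) :
    PySem.Chars.stripChars (dedupF g) ['-'] =
      (if (List.foldl stepG ([], false) g).2 then (List.foldl stepG ([], false) g).1.dropLast
       else (List.foldl stepG ([], false) g).1) := by
  rw [foldl_stepG_dropWhile, stripChars_dash]
  rw [dropWhile_dedupF g.length g le_rfl]
  have hhead : ∀ b, (List.dropWhile (fun x => x == '-') g).head? = some b → b ≠ '-' := by
    intro b hb hb'
    subst hb'
    have := dropWhile_head_false hb
    simp at this
  generalize hG : List.dropWhile (fun x => x == '-') g = g0 at hhead ⊢
  cases g0 with
  | nil =>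
    rw [dedupF_nil]
    simp
  | cons c t =>
    have hc : c ≠ '-' := hhead c rfl
    rw [dedupF_cons_ne c t hc]
    have hnd : ¬ (['-', '-'] <:+: dedupF t) := dedupF_no_dd_out t.length t le_rfl
    rw [rstrip_no_dd (dedupF t) c hnd hc]
    -- now the B side
    rw [List.foldl_cons]
    have hstep1 : stepG ([], false) c = ([c], false) := by rw [stepG, if_neg hc]; rfl
    rw [hstep1, foldl_stepG_emitE t ([c], false) (by simp)]
    obtain ⟨hE1, hE2, -, -⟩ := emitE_spec t
    simp only [List.singleton_append, hE1, hE2]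
    by_cases hlast : (dedupF t).getLast? = some '-'
    · rw [if_pos (by simp [hlast]), if_pos (by simp [hlast])]
      have hne : dedupF t ≠ [] := by
        intro hnil
        rw [hnil] at hlast
        simp at hlast
      rw [List.dropLast_cons_of_ne_nil hne]
    · rw [if_neg (by simp [hlast]), if_neg (by simp [hlast])]

-- map composition: the two single-character replaces are one dashify map
theorem map_dashify (l : List Char) :
    (l.map (fun c => if c = ' ' then '-' else c)).map (fun c => if c = '_' then '-' else c) =
      l.map dashify := by
  rw [List.map_map]
  apply List.map_congr_left
  intro c _
  simp only [Function.comp, dashify]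
  by_cases h1 : c = ' '
  · subst h1; simp
  · rw [if_neg h1, if_neg h1]

-- ===== VERDICT (by name: the statement is the Claim_ definition above) =====
set_option maxHeartbeats 1000000 in
theorem generate_demo_name_py_spec : Claim_equal_generate_demo_name_py := by
  intro name language _
  unfold Spec_generate_demo_name_py
  apply String.toList_inj.mp
  rw [generate_demo_name_py, generate_demo_name_py_alt]
  simp only [String.toList_ofList]
  have hsp : (" " : String).toList = [' '] := by decide
  have hun : ("_" : String).toList = ['_'] := by decide
  have hda : ("-" : String).toList = ['-'] := by decide
  have h1 : (PySem.Str.replace (PySem.Str.replace (PySem.Str.lower name) " " "-") "_" "-").toList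
      = (PySem.Chars.lower name.toList).map dashify := by
    simp only [PySem.Str.toList_replace, PySem.Str.toList_lower, hsp, hun, hda]
    rw [replace_single, replace_single, map_dashify]
  set g := ((PySem.Chars.lower name.toList).map dashify).filter keepP with hgdef
  have h4 : (PySem.Str.stripChars (collapseLoop (String.ofList
      ((PySem.Str.replace (PySem.Str.replace (PySem.Str.lower name) " " "-") "_" "-").toList.filter
        (fun c => decide (c.toNat ≤ 127) && (PySem.Chars.isalnum c || c == '-'))))) "-").toList
      = PySem.Chars.stripChars (dedupF g) ['-'] := by
    rw [PySem.Str.toList_stripChars, hda]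
    rw [collapseLoop_toList _ _ le_rfl, String.toList_ofList, h1]
    rfl
  have hB : (PySem.Chars.lower name.toList).foldl altStep ([], false) =
      List.foldl stepG ([], false) g := fold_red _ _
  rw [core_lemma g] at h4
  rw [hB]
  rw [PySem.Str.toList_lower]
  refine congrArg (fun z => PySem.Chars.lower language.toList ++ '-' :: z) ?_
  set st := List.foldl stepG ([], false) g with hst
  set out := (if st.2 then st.1.dropLast else st.1) with hout
  by_cases hemp : out.isEmpty
  · rw [if_pos (by rw [h4]; exact hemp), if_pos hemp]
  · rw [if_neg (by rw [h4]; exact hemp), if_neg hemp]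
    exact h4
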